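-- pv_equiv track=rewrite | github.com/rohitdutta2510/Graph-Centrality-Measures | gen_centrality.py | add_sink_nodes
-- ===== SOURCE A (Python) =====
-- def add_sink_nodes(graph, node_list):
--     graph_nodes = list(graph.keys())
--     sink_nodes = []
--     # Identify and extract the sink nodes from the node list
--     for node in node_list:
--         if node not in graph_nodes:
--             sink_nodes.append(node)
--
--     # Sink nodes modification
--     for node in sink_nodes:
--         add_nodes = []
--         for key, values in graph.items():
--             if node in values:
--                 add_nodes.append(key)
--         graph[node] = add_nodes
--
--     return graph
-- ===== SOURCE B (Python) =====
-- def add_sink_nodes(graph, node_list):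
--     # One pass over the edges builds a reverse-adjacency (predecessor) map,
--     # then each sink is answered by a single lookup.
--     keys = set(graph)
--     preds = {}
--     for k, vs in graph.items():
--         for v in dict.fromkeys(vs):
--             preds.setdefault(v, []).append(k)
--     for node in node_list:
--         if node not in keys:
--             graph[node] = preds.get(node, [])
--     return graph
-- ===== Notes on version B (the rewrite author's own statement) =====
-- stated objective: faster
-- what changed: Instead of rescanning every graph entry once per sink, B builds a reverse-adjacency (predecessor) map in one pass over the edges and answers each sink by a single dictionary lookup.
import Mathlib
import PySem

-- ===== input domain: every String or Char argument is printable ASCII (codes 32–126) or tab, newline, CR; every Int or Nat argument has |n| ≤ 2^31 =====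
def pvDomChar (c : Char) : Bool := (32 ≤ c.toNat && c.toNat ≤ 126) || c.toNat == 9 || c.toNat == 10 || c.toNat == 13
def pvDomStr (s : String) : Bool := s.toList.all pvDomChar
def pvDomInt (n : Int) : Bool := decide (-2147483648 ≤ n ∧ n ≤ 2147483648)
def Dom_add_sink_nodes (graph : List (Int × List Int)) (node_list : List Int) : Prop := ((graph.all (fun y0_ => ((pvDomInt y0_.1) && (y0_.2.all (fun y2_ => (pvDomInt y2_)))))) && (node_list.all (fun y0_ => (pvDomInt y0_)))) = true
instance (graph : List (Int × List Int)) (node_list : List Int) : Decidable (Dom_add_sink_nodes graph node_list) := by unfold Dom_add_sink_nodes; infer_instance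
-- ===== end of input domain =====

-- B replaces A's per-sink scan of all graph entries by one reverse-adjacency (predecessor) map
-- built in a single pass over the edges (objective: faster). A mutates the dict `graph` in place
-- and B performs the same mutation; the theorem is about the returned dict.

-- ===== PORT A =====
-- one step of A's second loop: collect the keys whose value list contains `node`, then graph[node] = add_nodes
def pvStepA (g : PySem.Dict Int (List Int)) (node : Int) : PySem.Dict Int (List Int) :=
  let add_nodes : List Int :=
    g.items.foldl (fun acc kv => if node ∈ kv.2 then acc ++ [kv.1] else acc) []
  g.insert node add_nodes

def add_sink_nodes (graph : List (Int × List Int)) (node_list : List Int) : List (Int × List Int) :=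
  let g0 : PySem.Dict Int (List Int) := PySem.Dict.mk graph
  let graph_nodes : List Int := g0.keys
  let sink_nodes : List Int :=
    node_list.foldl (fun acc node => if node ∈ graph_nodes then acc else acc ++ [node]) []
  (sink_nodes.foldl pvStepA g0).items

-- ===== PORT B =====
def add_sink_nodes_alt (graph : List (Int × List Int)) (node_list : List Int) : List (Int × List Int) :=
  let keys : PySem.Set Int := PySem.Set.ofList ((PySem.Dict.mk graph).keys)
  let preds : PySem.Dict Int (List Int) :=
    graph.foldl (fun p kv =>
      (PySem.List.dedup kv.2).foldl (fun p v => p.modify v [] (· ++ [kv.1])) p)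
      PySem.Dict.empty
  (node_list.foldl (fun g node =>
      if node ∈ keys then g else g.insert node (preds.getD node []))
    (PySem.Dict.mk graph)).items

-- ===== PRECONDITION & SPEC =====
-- `graph` is a Python dict, whose keys are necessarily distinct; the claim is stated for exactly
-- those association lists (every dict-shaped input satisfies this).
def Pre_add_sink_nodes (graph : List (Int × List Int)) (_node_list : List Int) : Prop :=
  (graph.map Prod.fst).Nodup
instance (graph : List (Int × List Int)) (node_list : List Int) : Decidable (Pre_add_sink_nodes graph node_list) := by unfold Pre_add_sink_nodes; infer_instance
def pvWitness_add_sink_nodes : (List (Int × List Int)) × List Int := ([(1, [2, 3]), (2, [1])], [1, 2, 3])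

def Spec_add_sink_nodes (graph : List (Int × List Int)) (node_list : List Int) (out : List (Int × List Int)) : Prop := out = add_sink_nodes_alt graph node_list
instance (graph : List (Int × List Int)) (node_list : List Int) (out : List (Int × List Int)) : Decidable (Spec_add_sink_nodes graph node_list out) := by unfold Spec_add_sink_nodes; infer_instance

-- ===== CLAIM (what is proved, stated in full; the proofs are below) =====
def Claim_equal_add_sink_nodes : Prop := ∀ (graph : List (Int × List Int)) (node_list : List Int), Dom_add_sink_nodes graph node_list → Pre_add_sink_nodes graph node_list → Spec_add_sink_nodes graph node_list (add_sink_nodes graph node_list)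

-- ===== LEMMAS AND PROOFS =====

-- the in-degree list both programs attach to a sink n: the original keys whose value list contains n
def pvPreds (graph : List (Int × List Int)) (n : Int) : List Int :=
  (graph.filter (fun kv => decide (n ∈ kv.2))).map (·.1)

theorem pvPreds_subset (graph : List (Int × List Int)) (n v : Int)
    (h : v ∈ pvPreds graph n) : v ∈ graph.map Prod.fst := by
  unfold pvPreds at h
  rcases List.mem_map.1 h with ⟨kv, hkv, rfl⟩
  exact List.mem_map.2 ⟨kv, (List.mem_filter.1 hkv).1, rfl⟩

-- B's inner loop over dict.fromkeys(vs): each key k contributes itself once to preds[v] for v ∈ vs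
theorem pv_inner (vs : List Int) (k c : Int) (p : PySem.Dict Int (List Int)) :
    ((PySem.List.dedup vs).foldl (fun p v => p.modify v [] (· ++ [k])) p).getD c []
      = p.getD c [] ++ (if c ∈ vs then [k] else []) := by
  have h1 : (PySem.List.dedup vs).foldl (fun p v => p.modify v [] (· ++ [k])) p
      = ((PySem.List.dedup vs).map (fun v => (v, k))).foldl
          (fun d q => d.modify q.1 [] (· ++ [q.2])) p := by
    rw [List.foldl_map]
  rw [h1, PySem.Dict.getD_foldl_modify_append]
  congr 1
  rw [List.filter_map, List.map_map]
  have h2 : (PySem.List.dedup vs).filter ((fun q => q.1 == c) ∘ (fun v => (v, k)))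
      = if c ∈ vs then [c] else [] := by
    have : ((fun q => q.1 == c) ∘ (fun v : Int => (v, k))) = (fun v => v == c) := rfl
    rw [this, List.filter_beq]
    by_cases hc : c ∈ vs
    · rw [List.count_eq_one_of_mem (PySem.List.nodup_dedup vs) ((PySem.List.mem_dedup vs c).2 hc)]
      simp [hc]
    · rw [List.count_eq_zero_of_not_mem (fun h => hc ((PySem.List.mem_dedup vs c).1 h))]
      simp [hc]
  rw [h2]
  by_cases hc : c ∈ vs <;> simp [hc]

-- B's reverse-adjacency map: looking up c gives exactly pvPreds graph c
theorem pv_predsDict (graph : List (Int × List Int)) (c : Int)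
    (d : PySem.Dict Int (List Int)) :
    (graph.foldl (fun p kv =>
        (PySem.List.dedup kv.2).foldl (fun p v => p.modify v [] (· ++ [kv.1])) p) d).getD c []
      = d.getD c [] ++ pvPreds graph c := by
  induction graph generalizing d with
  | nil => simp [pvPreds]
  | cons kv t ih =>
    rw [List.foldl_cons, ih, pv_inner]
    unfold pvPreds
    by_cases hc : c ∈ kv.2 <;> simp [hc]

-- A's inner scan over the current dict: entries added for earlier sinks never match a sink node
theorem pv_addnodes (graph extra : List (Int × List Int)) (n : Int)
    (hex : ∀ kv ∈ extra, n ∉ kv.2) :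
    ((graph ++ extra).foldl (fun acc kv => if n ∈ kv.2 then acc ++ [kv.1] else acc)
        ([] : List Int)) = pvPreds graph n := by
  rw [PySem.List.foldl_append_ite (p := fun kv : Int × List Int => n ∈ kv.2) (f := fun kv => kv.1)]
  rw [List.filter_append]
  have h2 : extra.filter (fun kv => decide (n ∈ kv.2)) = [] := by
    apply List.filter_eq_nil_iff.2
    intro kv hkv
    simpa using hex kv hkv
  rw [h2]
  simp [pvPreds]

-- the heart of the equivalence: along A's second loop the dict is always
-- `original graph ++ extra sink entries` whose value lists live inside the original keys,
-- so A's rescan of the whole dict computes exactly pvPreds of the ORIGINAL graph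
theorem pv_main (graph : List (Int × List Int)) (s : List Int)
    (hs : ∀ n ∈ s, n ∉ graph.map Prod.fst)
    (extra : List (Int × List Int))
    (hex : ∀ kv ∈ extra, ∀ v ∈ kv.2, v ∈ graph.map Prod.fst) :
    s.foldl pvStepA (PySem.Dict.mk (graph ++ extra))
      = s.foldl (fun g node => g.insert node (pvPreds graph node))
          (PySem.Dict.mk (graph ++ extra)) := by
  induction s generalizing extra with
  | nil => rfl
  | cons n t ih =>
    have hn : n ∉ graph.map Prod.fst := hs n (List.mem_cons_self)
    have hstep : pvStepA (PySem.Dict.mk (graph ++ extra)) n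
        = (PySem.Dict.mk (graph ++ extra)).insert n (pvPreds graph n) := by
      unfold pvStepA
      show (PySem.Dict.mk (graph ++ extra)).insert n
          ((graph ++ extra).foldl (fun acc kv => if n ∈ kv.2 then acc ++ [kv.1] else acc) []) = _
      rw [pv_addnodes graph extra n (fun kv hkv hmem => hn (hex kv hkv n hmem))]
    rw [List.foldl_cons, List.foldl_cons, hstep]
    -- the inserted dict is again of the form graph ++ extra'
    have hgraph_unchanged : ∀ p ∈ graph, (if p.1 == n then (n, pvPreds graph n) else p) = p := by
      intro p hp
      have : p.1 ≠ n := fun h => hn (h ▸ List.mem_map.2 ⟨p, hp, rfl⟩)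
      simp [this]
    by_cases hcont : (PySem.Dict.mk (graph ++ extra)).contains n
    · have hit : (PySem.Dict.mk (graph ++ extra)).insert n (pvPreds graph n)
          = PySem.Dict.mk (graph ++ extra.map (fun p => if p.1 == n then (n, pvPreds graph n) else p)) := by
        apply PySem.Dict.ext
        rw [PySem.Dict.items_insert_of_contains _ _ hcont]
        show (graph ++ extra).map _ = _
        rw [List.map_append, List.map_congr_left hgraph_unchanged]
        simp
      rw [hit, ih (fun m hm => hs m (List.mem_cons_of_mem n hm))]
      intro kv hkv v hv
      rcases List.mem_map.1 hkv with ⟨p, hp, rfl⟩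
      by_cases hpn : p.1 == n
      · simp only [hpn, if_pos] at hv
        exact pvPreds_subset graph n v hv
      · simp only [hpn, if_neg, Bool.false_eq_true, not_false_iff] at hv
        exact hex p hp v hv
    · have hit : (PySem.Dict.mk (graph ++ extra)).insert n (pvPreds graph n)
          = PySem.Dict.mk (graph ++ (extra ++ [(n, pvPreds graph n)])) := by
        apply PySem.Dict.ext
        rw [PySem.Dict.items_insert_of_not_contains _ _ (by simp only [Bool.not_eq_true] at hcont; exact hcont)]
        show (graph ++ extra) ++ _ = _
        rw [List.append_assoc]
      rw [hit, ih (fun m hm => hs m (List.mem_cons_of_mem n hm))]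
      intro kv hkv v hv
      rcases List.mem_append.1 hkv with h | h
      · exact hex kv h v hv
      · rcases List.mem_singleton.1 h with rfl
        exact pvPreds_subset graph n v hv

-- ===== VERDICT (by name: the statement is the Claim_ definition above) =====
theorem add_sink_nodes_spec : Claim_equal_add_sink_nodes := by
  intro graph node_list _hdom _hpre
  unfold Spec_add_sink_nodes add_sink_nodes add_sink_nodes_alt
  dsimp only
  have hkeys : (PySem.Dict.mk graph).keys = graph.map Prod.fst := PySem.Dict.keys_mk graph
  -- both skip-loops are folds over the same filtered list of sinks
  have hsinkA : node_list.foldl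
      (fun acc node => if node ∈ (PySem.Dict.mk graph).keys then acc else acc ++ [node]) []
      = node_list.filter (fun node => decide (¬ node ∈ (PySem.Dict.mk graph).keys)) := by
    have h : ∀ (acc : List Int) (node : Int),
        (if node ∈ (PySem.Dict.mk graph).keys then acc else acc ++ [node])
          = (if ¬ node ∈ (PySem.Dict.mk graph).keys then acc ++ [node] else acc) := by
      intro acc node
      by_cases h : node ∈ (PySem.Dict.mk graph).keys
      · rw [if_pos h, if_neg (not_not_intro h)]
      · rw [if_neg h, if_pos h]
    rw [PySem.List.foldl_congr_mem _ _ _ _ (fun acc node _ => h acc node),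
      PySem.List.foldl_append_ite_eq_filter]
    simp
  have hB : node_list.foldl
      (fun g node => if node ∈ PySem.Set.ofList ((PySem.Dict.mk graph).keys) then g
        else g.insert node ((graph.foldl (fun p kv =>
          (PySem.List.dedup kv.2).foldl (fun p v => p.modify v [] (· ++ [kv.1])) p)
          PySem.Dict.empty).getD node []))
      (PySem.Dict.mk graph)
      = (node_list.filter (fun node => decide (¬ node ∈ (PySem.Dict.mk graph).keys))).foldl
          (fun g node => g.insert node (pvPreds graph node)) (PySem.Dict.mk graph) := by
    have h : ∀ (g : PySem.Dict Int (List Int)) (node : Int),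
        (if node ∈ PySem.Set.ofList ((PySem.Dict.mk graph).keys) then g
          else g.insert node ((graph.foldl (fun p kv =>
            (PySem.List.dedup kv.2).foldl (fun p v => p.modify v [] (· ++ [kv.1])) p)
            PySem.Dict.empty).getD node []))
        = (if ¬ node ∈ (PySem.Dict.mk graph).keys then g.insert node (pvPreds graph node) else g) := by
      intro g node
      rw [pv_predsDict, PySem.Dict.getD_empty]
      by_cases h : node ∈ (PySem.Dict.mk graph).keys
      · rw [if_pos ((PySem.Set.mem_ofList _ _).2 h), if_neg (not_not_intro h)]
      · rw [if_neg (fun hm => h ((PySem.Set.mem_ofList _ _).1 hm)), if_pos h, List.nil_append]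
    rw [PySem.List.foldl_congr_mem _ _ _ _ (fun g node _ => h g node),
      PySem.List.foldl_ite_eq_foldl_filter]
  rw [hB]
  simp only [hsinkA]
  have := pv_main graph
    (node_list.filter (fun node => decide (¬ node ∈ (PySem.Dict.mk graph).keys)))
    (fun n hn => by
      have := (List.mem_filter.1 hn).2
      rw [← hkeys]
      simpa using this)
    [] (by intro kv hkv; cases hkv)
  rw [List.append_nil] at this
  rw [this]
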